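-- pv_equiv track=rewrite | github.com/MariusC-UTM/Python-Odyssey-Bootcamp | Homework/lesson_11/task_1.py | task_11
-- ===== SOURCE A (Python) =====
-- def task_11(*args):
--     if len(args) < 2:
--         return False
--     if args[0] != 1 or args[1] != 1:
--         return False
--     a, b = 1, 1
--     for i in range(2, len(args)):
--         c = a + b
--         if args[i] != c:
--             return False
--         a, b = b, c
--     return True
-- ===== SOURCE B (Python) =====
-- def task_11(*args):
--     if len(args) < 2:
--         return False
--     expected = [1, 1]
--     while len(expected) < len(args):
--         expected.append(expected[-1] + expected[-2])
--     return list(args) == expected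
-- ===== Notes on version B (the rewrite author's own statement) =====
-- stated objective: alternative
-- what changed: Replaces the interleaved check-as-you-go loop with early returns by a two-phase decomposition: first build the whole expected Fibonacci list of the right length, then compare it to the input with one bulk equality.
import Mathlib
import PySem

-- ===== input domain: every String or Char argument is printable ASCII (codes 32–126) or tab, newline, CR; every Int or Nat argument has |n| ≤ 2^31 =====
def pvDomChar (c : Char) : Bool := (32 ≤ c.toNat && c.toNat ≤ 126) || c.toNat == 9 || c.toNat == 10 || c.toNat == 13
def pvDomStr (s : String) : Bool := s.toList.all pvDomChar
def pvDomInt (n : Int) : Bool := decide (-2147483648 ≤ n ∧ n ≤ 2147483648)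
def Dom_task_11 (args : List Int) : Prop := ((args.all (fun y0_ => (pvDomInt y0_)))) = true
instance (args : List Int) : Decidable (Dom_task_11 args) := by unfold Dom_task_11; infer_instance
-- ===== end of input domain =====

-- B replaces A's interleaved generate-and-check loop (with early returns) by a two-phase
-- decomposition: build the full expected Fibonacci list, then one bulk equality comparison.
-- ===== PORT A =====
def task11Loop (args : List Int) (a b : Int) (i : Nat) : Bool :=
  if _h : i < args.length then
    let c := a + b
    if (PySem.List.pyGet? args (i : Int)).getD 0 ≠ c then false
    else task11Loop args b c (i + 1)
  else true
termination_by args.length - i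

def task_11 (args : List Int) : Bool :=
  if args.length < 2 then false
  else if (PySem.List.pyGet? args 0).getD 0 ≠ (1 : Int) ∨ (PySem.List.pyGet? args 1).getD 0 ≠ (1 : Int) then false
  else task11Loop args 1 1 2

-- ===== PORT B =====
-- while len(expected) < n: expected.append(expected[-1] + expected[-2])
def fibGrow (acc : List Int) (n : Nat) : List Int :=
  if acc.length < n then
    fibGrow (acc ++ [(PySem.List.pyGet? acc (-1)).getD 0 + (PySem.List.pyGet? acc (-2)).getD 0]) n
  else acc
termination_by n - acc.length
decreasing_by simp_all; omega

def task_11_alt (args : List Int) : Bool :=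
  if args.length < 2 then false
  else args = fibGrow [1, 1] args.length

-- ===== PRECONDITION & SPEC =====
def Spec_task_11 (args : List Int) (out : Bool) : Prop := out = task_11_alt args
instance (args : List Int) (out : Bool) : Decidable (Spec_task_11 args out) := by unfold Spec_task_11; infer_instance

-- ===== CLAIM (what is proved, stated in full; the proofs are below) =====
def Claim_equal_task_11 : Prop := ∀ (args : List Int), Dom_task_11 args → Spec_task_11 args (task_11 args)

-- ===== LEMMAS AND PROOFS =====


def fibFrom (a b : Int) : Nat → List Int
  | 0 => []
  | k + 1 => (a + b) :: fibFrom b (a + b) k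

theorem fibGrow_spec (k : Nat) : ∀ (L : List Int) (a b : Int),
    fibGrow (L ++ [a, b]) (L.length + 2 + k) = L ++ [a, b] ++ fibFrom a b k := by
  induction k with
  | zero =>
    intro L a b
    rw [fibGrow]
    rw [if_neg (by simp)]
    simp [fibFrom]
  | succ k ih =>
    intro L a b
    rw [fibGrow]
    have h1 : (L ++ [a, b]).length < L.length + 2 + (k + 1) := by simp
    rw [if_pos h1]
    have e1 : (PySem.List.pyGet? (L ++ [a, b]) (-1)).getD 0 = b := by
      have : L ++ [a, b] = (L ++ [a]) ++ [b] := by simp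
      rw [this, PySem.List.pyGet?_neg_one_append_singleton]; rfl
    have e2 : (PySem.List.pyGet? (L ++ [a, b]) (-2)).getD 0 = a := by
      rw [PySem.List.pyGet?_neg_ofNat (L ++ [a, b]) 2 (by omega) (by simp)]
      simp
    rw [e1, e2]
    have e3 : L ++ [a, b] ++ [b + a] = (L ++ [a]) ++ [b, b + a] := by simp
    have e4 : L.length + 2 + (k + 1) = (L ++ [a]).length + 2 + k := by
      simp only [List.length_append, List.length_cons, List.length_nil]
      omega
    rw [e3, e4, ih (L ++ [a]) b (b + a)]
    show L ++ [a] ++ [b, b + a] ++ fibFrom b (b + a) k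
        = L ++ [a, b] ++ ((a + b) :: fibFrom b (a + b) k)
    rw [Int.add_comm a b]
    simp

theorem loop_spec (m : Nat) : ∀ (args : List Int) (a b : Int) (i : Nat),
    args.length - i = m →
    task11Loop args a b i = decide (args.drop i = fibFrom a b (args.length - i)) := by
  induction m with
  | zero =>
    intro args a b i hm
    rw [task11Loop]
    have : ¬ i < args.length := by omega
    rw [dif_neg this, hm]
    simp [fibFrom]
    omega
  | succ m ih =>
    intro args a b i hm
    have hi : i < args.length := by omega
    rw [task11Loop, dif_pos hi]
    have hget : (PySem.List.pyGet? args (i : Int)).getD 0 = args[i] := by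
      simp [PySem.List.pyGet?_natCast, List.getElem?_eq_getElem hi]
    rw [hm]
    have hdrop : args.drop i = args[i] :: args.drop (i + 1) := by
      exact (List.drop_eq_getElem_cons hi)
    rw [hdrop]
    simp only [fibFrom, hget]
    by_cases hc : args[i] = a + b
    · rw [if_neg (by simp [hc])]
      rw [ih args b (a + b) (i + 1) (by omega)]
      have : args.length - (i + 1) = m := by omega
      rw [this]
      simp [hc]
    · rw [if_pos (by simp [hc])]
      rw [eq_comm, decide_eq_false_iff_not]
      intro heq
      injection heq with h1 _
      exact hc h1

theorem task_11_spec : Claim_equal_task_11 := by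
  intro args _
  unfold Spec_task_11
  unfold task_11 task_11_alt
  by_cases hlen : args.length < 2
  · rw [if_pos hlen, if_pos hlen]
  · rw [if_neg hlen, if_neg hlen]
    obtain _ | ⟨a0, _ | ⟨a1, rest⟩⟩ := args
    · simp at hlen
    · simp at hlen
    · have hg : fibGrow [1, 1] (a0 :: a1 :: rest).length
          = [1, 1] ++ fibFrom 1 1 rest.length := by
        rw [show (a0 :: a1 :: rest).length = ([] : List Int).length + 2 + rest.length by
          simp; omega]
        exact fibGrow_spec rest.length ([] : List Int) 1 1
      have h0 : (PySem.List.pyGet? (a0 :: a1 :: rest) 0).getD 0 = a0 := by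
        simp [PySem.List.pyGet?_zero_cons]
      have h1 : (PySem.List.pyGet? (a0 :: a1 :: rest) 1).getD 0 = a1 := by
        rw [show ((1:Int)) = ((1:Nat):Int) by rfl, PySem.List.pyGet?_natCast]
        rfl
      rw [hg, h0, h1]
      have hloop := loop_spec ((a0 :: a1 :: rest).length - 2) (a0 :: a1 :: rest) 1 1 2 rfl
      have hd2 : (a0 :: a1 :: rest).drop 2 = rest := rfl
      have hl2 : (a0 :: a1 :: rest).length - 2 = rest.length := by simp
      rw [hd2, hl2] at hloop
      by_cases hc : a0 ≠ (1:Int) ∨ a1 ≠ (1:Int)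
      · rw [if_pos hc]
        simp only [List.cons_append, List.nil_append]
        rcases hc with h | h <;> simp [h]
      · rw [if_neg hc]
        rw [not_or, not_not, not_not] at hc
        rw [hloop]
        simp [hc.1, hc.2]
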